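-- pv_equiv track=rewrite | github.com/liboyin/algo-prac | mathematics/stirling_num.py | first_kind
-- ===== SOURCE A (Python) =====
-- def first_kind(n, k):
--     """
--     Denote by S(n, k) the number of ways n elements can be arranged as k non-empty permutations.
--     Recursively, S(n + 1, k) = S(n, k - 1) + n * S(n, k), where S(n, k - 1) creates a new permutation for the current
--         element, and n * S(n, k) inserts the current element to the left of any element in existing permutations.
--     Base case: S(x, x) = 1, where x >= 0; S(x, 0) = 0, where x >= 1.
--     :param n: int, non-negative
--     :param k: int, non-negative
--     :return: int
--     """
--     if n == k:
--         return 1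
--     if k == 0:
--         return 0
--     dp = [[0] * (k+1) for _ in range(n+1)]
--     for i in range(k + 1):  # n >= k
--         dp[i][i] = 1
--     for i in range(2, n+1):
--         for j in range(1, min(i, k+1)):
--             dp[i][j] = dp[i - 1][j - 1] + (i - 1) * dp[i - 1][j]
--     return dp[-1][-1]
-- ===== SOURCE B (Python) =====
-- def first_kind(n, k):
--     # Divide-and-conquer: build the rising factorial x(x+1)...(x+n-1) as a
--     # coefficient list by recursively multiplying the linear factors (x + c)
--     # for c in [0, n) in a balanced tree, with a generic polynomial product
--     # truncated to k+1 coefficients (higher ones are never read); the x^k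
--     # coefficient is the unsigned Stirling number of the first kind.
--     # Base cases from the definition: S(n, n) = 1 and S(n, 0) = 0 otherwise.
--     if n == k:
--         return 1
--     if k == 0:
--         return 0
--     K = max(k + 1, 0)  # only coefficients up to x^k are needed
--
--     def polymul(p, q):  # polynomial product, truncated to K coefficients
--         r = [0] * min(len(p) + len(q) - 1, K)
--         for i, a in enumerate(p):
--             if i >= K:
--                 break
--             for j, b in enumerate(q):
--                 if i + j >= K:
--                     break
--                 r[i + j] += a * b
--         return r
--
--     def prod(lo, hi):  # product of (x + c) for c in range(lo, hi)
--         if hi <= lo: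
--             return [1]
--         if hi == lo + 1:
--             return [lo, 1]
--         mid = (lo + hi) // 2
--         return polymul(prod(lo, mid), prod(mid, hi))
--
--     poly = prod(0, n)
--     return poly[k]  # k <= len(poly) - 1 = min(n, k) on the documented domain
-- ===== Notes on version B (the rewrite author's own statement) =====
-- stated objective: alternative
-- what changed: B replaces A's (n+1)x(k+1) 2D DP table with a balanced divide-and-conquer product of the linear factors (x+c) of the rising factorial, using a generic polynomial multiplication truncated to k+1 coefficients, and reads off the x^k coefficient (keeping the definition's base cases S(n,n)=1, S(n,0)=0 as shortcuts).
import Mathlib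
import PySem

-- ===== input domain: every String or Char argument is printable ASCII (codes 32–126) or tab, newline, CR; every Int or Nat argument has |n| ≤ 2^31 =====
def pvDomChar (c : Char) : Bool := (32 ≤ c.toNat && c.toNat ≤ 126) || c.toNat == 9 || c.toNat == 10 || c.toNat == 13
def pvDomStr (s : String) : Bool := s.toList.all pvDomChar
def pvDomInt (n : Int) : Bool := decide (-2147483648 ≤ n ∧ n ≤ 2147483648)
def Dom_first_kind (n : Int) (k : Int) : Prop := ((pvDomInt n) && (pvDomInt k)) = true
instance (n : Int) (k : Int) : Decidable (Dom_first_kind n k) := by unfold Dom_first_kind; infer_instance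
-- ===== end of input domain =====

-- B replaces A's 2D DP table by a balanced divide-and-conquer product of the rising
-- factorial's linear factors via a generic polynomial multiplication truncated to k+1
-- coefficients, extracting the x^k coefficient (alternative algorithm, no speed claim).


-- ===== PORT A =====
-- dp[i][j] read / write on the list-of-lists table (all indices are in range on Pre_)
def dpGet (dp : List (List Int)) (i j : Nat) : Int := (dp.getD i []).getD j 0
def dpSet (dp : List (List Int)) (i j : Nat) (v : Int) : List (List Int) :=
  dp.set i ((dp.getD i []).set j v)

def first_kind (n : Int) (k : Int) : Int :=
  if n = k then 1
  else if k = 0 then 0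
  else
    let K : Nat := (k + 1).toNat                  -- k+1 columns
    let N : Nat := (n + 1).toNat                  -- n+1 rows
    let dp0 := List.replicate N (List.replicate K (0 : Int))
    -- for i in range(k+1): dp[i][i] = 1
    let dp1 := (List.range K).foldl (fun dp i => dpSet dp i i 1) dp0
    -- for i in range(2, n+1): for j in range(1, min(i, k+1)): dp[i][j] = dp[i-1][j-1] + (i-1)*dp[i-1][j]
    let dp2 := (List.range' 2 (N - 2)).foldl (fun dp i =>
      (List.range' 1 (min i K - 1)).foldl (fun dp j =>
        dpSet dp i j (dpGet dp (i - 1) (j - 1) + ((i - 1 : Nat) : Int) * dpGet dp (i - 1) j)) dp) dp1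
    -- return dp[-1][-1]  (exact for the nonempty table every Pre_ input builds)
    let lastRow := dp2.getD (dp2.length - 1) []
    lastRow.getD (lastRow.length - 1) 0

-- ===== PORT B =====
-- polymulT: Source B's polymul — double loop accumulating a*b into r[i+j], truncated to K
-- coefficients ('break' on an ascending index ported as cutting the iteration there)
def innerT (K : Nat) (i : Nat) (a : Int) : List Int → Nat → List Int → List Int
  | [], _, r => r
  | b :: q, j, r =>
    if K ≤ i + j then r
    else innerT K i a q (j + 1) (r.set (i + j) (r.getD (i + j) 0 + a * b))

def outerT (K : Nat) : List Int → Nat → List Int → List Int → List Int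
  | [], _, _, r => r
  | a :: p, i, q, r =>
    if K ≤ i then r
    else outerT K p (i + 1) q (innerT K i a q 0 r)

def polymulT (K : Nat) (p q : List Int) : List Int :=
  outerT K p 0 q (List.replicate (min (p.length + q.length - 1) K) 0)

-- prodT K lo hi: truncated coefficient list of the product of (x + c) for c in range(lo, hi)
def prodT (K : Nat) (lo hi : Nat) : List Int :=
  if hi ≤ lo then [1]
  else if hi = lo + 1 then [(lo : Int), 1]
  else polymulT K (prodT K lo ((lo + hi) / 2)) (prodT K ((lo + hi) / 2) hi)
termination_by hi - lo
decreasing_by all_goals omega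

def first_kind_alt (n : Int) (k : Int) : Int :=
  if n = k then 1
  else if k = 0 then 0
  else
    let K : Nat := (k + 1).toNat        -- max(k + 1, 0)
    let poly := prodT K 0 n.toNat
    -- poly[k]: Python indexing (negative from the end; out of range = IndexError, which
    -- happens only outside Pre_) — exact via PySem.List.pyGet?
    (PySem.List.pyGet? poly k).getD 0

-- ===== PRECONDITION & SPEC =====
-- Pre_ is exactly the set of inputs on which A returns (everywhere else A raises
-- IndexError on its empty or too-narrow table): the natural domain 0 <= k <= n
-- plus the two early-return lines n == k and k == 0.
def Pre_first_kind (n : Int) (k : Int) : Prop := (0 ≤ k ∧ k ≤ n) ∨ n = k ∨ k = 0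
instance (n : Int) (k : Int) : Decidable (Pre_first_kind n k) := by unfold Pre_first_kind; infer_instance
def pvWitness_first_kind : Int × Int := (6, 3)

def Spec_first_kind (n : Int) (k : Int) (out : Int) : Prop := out = first_kind_alt n k
instance (n : Int) (k : Int) (out : Int) : Decidable (Spec_first_kind n k out) := by unfold Spec_first_kind; infer_instance

-- ===== CLAIM (what is proved, stated in full; the proofs are below) =====
def Claim_equal_first_kind : Prop := ∀ (n : Int) (k : Int), Dom_first_kind n k → Pre_first_kind n k → Spec_first_kind n k (first_kind n k)

-- ===== LEMMAS AND PROOFS =====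

-- the unsigned Stirling numbers of the first kind, the mathematical reference value
def sN : Nat → Nat → Int
  | 0, 0 => 1
  | 0, _ + 1 => 0
  | i + 1, j => (match j with | 0 => 0 | t + 1 => sN i t) + (i : Int) * sN i j

theorem sN_rec (p t : Nat) : sN (p + 1) (t + 1) = sN p t + (p : Int) * sN p (t + 1) := rfl

theorem sN_rec0 (p : Nat) : sN (p + 1) 0 = 0 + (p : Int) * sN p 0 := rfl

theorem sN_vanish : ∀ i j : Nat, i < j → sN i j = 0 := by
  intro i
  induction i with
  | zero =>
    intro j h
    cases j with
    | zero => omega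
    | succ t => rfl
  | succ i ih =>
    intro j h
    cases j with
    | zero => omega
    | succ t =>
      rw [sN_rec, ih t (by omega), ih (t + 1) (by omega)]
      ring

theorem sN_diag : ∀ i : Nat, sN i i = 1 := by
  intro i
  induction i with
  | zero => rfl
  | succ i ih =>
    rw [sN_rec, ih, sN_vanish i (i + 1) (by omega)]
    ring

theorem sN_zero : ∀ i : Nat, sN (i + 1) 0 = 0 := by
  intro i
  induction i with
  | zero => rfl
  | succ i ih =>
    rw [sN_rec0, ih]
    ring

-- ===== B side: polynomial semantics of coefficient lists =====
theorem getD_set {α : Type} (l : List α) (i i' : Nat) (v d : α) :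
    (l.set i v).getD i' d = if i = i' ∧ i < l.length then v else l.getD i' d := by
  rw [List.getD_eq_getElem?_getD, List.getD_eq_getElem?_getD, List.getElem?_set]
  by_cases h1 : i = i'
  · subst h1
    by_cases h2 : i < l.length <;> simp [h2]
  · simp [h1]

noncomputable def toPoly : List Int → Polynomial ℤ
  | [] => 0
  | a :: l => Polynomial.C a + Polynomial.X * toPoly l

theorem coeff_toPoly : ∀ (l : List Int) (m : Nat), (toPoly l).coeff m = l.getD m 0 := by
  intro l
  induction l with
  | nil => intro m; simp [toPoly]
  | cons a l ih =>
    intro m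
    cases m with
    | zero => simp [toPoly, Polynomial.mul_coeff_zero]
    | succ t =>
      rw [toPoly, Polynomial.coeff_add, Polynomial.coeff_X_mul, Polynomial.coeff_C,
        if_neg (Nat.succ_ne_zero t), ih]
      simp

-- the inner loop: writes a * q_j into r[i + j] for j < K - i; lengths are preserved and,
-- on indices m < K that all writes reach, it adds the coefficients of a * q * X^(i+j)
theorem innerT_length (K i : Nat) (a : Int) : ∀ (q : List Int) (j : Nat) (r : List Int),
    (innerT K i a q j r).length = r.length := by
  intro q
  induction q with
  | nil => intro j r; rfl
  | cons b q ih =>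
    intro j r
    rw [innerT]
    split_ifs with h
    · rfl
    · rw [ih (j + 1)]
      simp

theorem innerT_getD (K i : Nat) (a : Int) : ∀ (q : List Int) (j : Nat) (r : List Int) (m : Nat),
    m < r.length → m < K → (r.length = K ∨ i + j + q.length ≤ r.length) →
    (innerT K i a q j r).getD m 0
      = r.getD m 0 + a * (toPoly q * Polynomial.X ^ (i + j)).coeff m := by
  intro q
  induction q with
  | nil =>
    intro j r m hm hK _
    simp [innerT, toPoly]
  | cons b q ih =>
    intro j r m hm hK hw
    rw [innerT]
    split_ifs with h
    · -- break: every dropped write has index i + j' ≥ i + j ≥ K > m, contributing 0 at m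
      rw [Polynomial.coeff_mul_X_pow', if_neg (by omega)]
      ring
    · have hrange : i + j < r.length := by
        rcases hw with hw | hw
        · omega
        · simp at hw; omega
      rw [ih (j + 1) _ m (by rw [List.length_set]; exact hm) hK
        (by rw [List.length_set]; rcases hw with hw | hw; · exact Or.inl hw
            · right; simp at hw ⊢; omega)]
      rw [getD_set]
      have e1 : toPoly (b :: q) = Polynomial.C b + Polynomial.X * toPoly q := rfl
      rw [e1, add_mul, Polynomial.coeff_add]
      have e2 : (Polynomial.X * toPoly q) * Polynomial.X ^ (i + j)
          = toPoly q * Polynomial.X ^ (i + (j + 1)) := by ring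
      rw [e2]
      have e3 : (Polynomial.C b * Polynomial.X ^ (i + j)).coeff m
          = if i + j = m then b else 0 := by
        rw [Polynomial.coeff_C_mul, Polynomial.coeff_X_pow]
        by_cases hij : i + j = m
        · rw [if_pos (by omega), if_pos hij]
          ring
        · rw [if_neg (by omega), if_neg hij]
          ring
      by_cases hij : i + j = m
      · rw [if_pos ⟨hij, hrange⟩, e3, if_pos hij, hij]
        ring
      · rw [if_neg (by tauto), e3, if_neg hij]
        ring

theorem outerT_length (K : Nat) : ∀ (p : List Int) (i : Nat) (q r : List Int),
    (outerT K p i q r).length = r.length := by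
  intro p
  induction p with
  | nil => intro i q r; rfl
  | cons a p ih =>
    intro i q r
    rw [outerT]
    split_ifs with h
    · rfl
    · rw [ih (i + 1), innerT_length]

theorem outerT_getD (K : Nat) : ∀ (p : List Int) (i : Nat) (q r : List Int) (m : Nat),
    m < r.length → m < K → (r.length = K ∨ i + p.length + q.length ≤ r.length + 1) →
    (outerT K p i q r).getD m 0
      = r.getD m 0 + (toPoly p * toPoly q * Polynomial.X ^ i).coeff m := by
  intro p
  induction p with
  | nil =>
    intro i q r m hm hK _
    simp [outerT, toPoly]
  | cons a p ih =>
    intro i q r m hm hK hw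
    rw [outerT]
    split_ifs with h
    · -- break: the remaining factor is a multiple of X^i with i ≥ K > m
      rw [Polynomial.coeff_mul_X_pow', if_neg (by omega)]
      ring
    · rw [ih (i + 1) q _ m (by rw [innerT_length]; exact hm) hK
        (by rw [innerT_length]; rcases hw with hw | hw; · exact Or.inl hw
            · right; simp at hw ⊢; omega)]
      rw [innerT_getD K i a q 0 r m hm hK
        (by rcases hw with hw | hw; · exact Or.inl hw
            · right; simp at hw ⊢; omega)]
      have e1 : toPoly (a :: p) = Polynomial.C a + Polynomial.X * toPoly p := rfl
      rw [e1, add_mul, add_mul, Polynomial.coeff_add]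
      have e2 : Polynomial.X * toPoly p * toPoly q * Polynomial.X ^ i
          = toPoly p * toPoly q * Polynomial.X ^ (i + 1) := by ring
      have e3 : Polynomial.C a * toPoly q * Polynomial.X ^ i
          = Polynomial.C a * (toPoly q * Polynomial.X ^ (i + 0)) := by ring
      rw [e2, e3, Polynomial.coeff_C_mul]
      ring

theorem polymulT_length (K : Nat) (p q : List Int) :
    (polymulT K p q).length = min (p.length + q.length - 1) K := by
  rw [polymulT, outerT_length, List.length_replicate]

theorem polymulT_getD (K : Nat) (p q : List Int) (m : Nat)
    (hm : m < min (p.length + q.length - 1) K) :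
    (polymulT K p q).getD m 0 = (toPoly p * toPoly q).coeff m := by
  rw [polymulT, outerT_getD K p 0 q _ m (by simpa using hm) (by omega)
    (by rw [List.length_replicate]; omega)]
  rw [List.getD_eq_getElem?_getD, List.getElem?_replicate,
    if_pos (by simpa using hm)]
  simp

-- agreement of the first K coefficients is preserved by multiplication
theorem coeff_mul_congr (K m : Nat) (hm : m < K) (P P' Q Q' : Polynomial ℤ)
    (hP : ∀ i, i < K → P.coeff i = P'.coeff i)
    (hQ : ∀ i, i < K → Q.coeff i = Q'.coeff i) :
    (P * Q).coeff m = (P' * Q').coeff m := by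
  rw [Polynomial.coeff_mul, Polynomial.coeff_mul]
  apply Finset.sum_congr rfl
  intro x hx
  rw [Finset.mem_antidiagonal] at hx
  rw [hP x.1 (by omega), hQ x.2 (by omega)]

theorem range'_split (lo mid hi : Nat) (h1 : lo ≤ mid) (h2 : mid ≤ hi) :
    List.range' lo (mid - lo) ++ List.range' mid (hi - mid) = List.range' lo (hi - lo) := by
  have e2 : hi - lo = (mid - lo) + (hi - mid) := by omega
  have e1 : mid = lo + (mid - lo) := by omega
  rw [e2, ← List.range'_append_1, ← e1]

-- the rising-factorial factor list and a degree bound on its partial products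
noncomputable def riseP (lo len : Nat) : Polynomial ℤ :=
  ((List.range' lo len).map (fun c : Nat => Polynomial.X + Polynomial.C (c : ℤ))).prod

theorem riseP_natDegree (lo len : Nat) : (riseP lo len).natDegree ≤ len := by
  refine le_trans (Polynomial.natDegree_list_prod_le _) ?_
  rw [List.map_map]
  have e : ∀ c ∈ List.range' lo len,
      (Polynomial.natDegree ∘ fun c : Nat => Polynomial.X + Polynomial.C (c : ℤ)) c = 1 := by
    intro c _
    simp only [Function.comp_apply]
    exact Polynomial.natDegree_X_add_C _
  rw [List.map_congr_left e]
  simp [List.map_const']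

theorem prodT_spec (K : Nat) (hK : 2 ≤ K) : ∀ (d lo hi : Nat), hi - lo ≤ d →
    (prodT K lo hi).length = min (hi - lo + 1) K ∧
    (∀ m, m < K → (toPoly (prodT K lo hi)).coeff m = (riseP lo (hi - lo)).coeff m) := by
  intro d
  induction d with
  | zero =>
    intro lo hi h
    have hle : hi ≤ lo := by omega
    rw [prodT, if_pos hle]
    have e : hi - lo = 0 := by omega
    refine ⟨by simp [e]; omega, ?_⟩
    intro m _
    simp [e, toPoly, riseP]
  | succ d ih =>
    intro lo hi h
    by_cases hle : hi ≤ lo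
    · rw [prodT, if_pos hle]
      have e : hi - lo = 0 := by omega
      refine ⟨by simp [e]; omega, ?_⟩
      intro m _
      simp [e, toPoly, riseP]
    · by_cases h1 : hi = lo + 1
      · rw [prodT, if_neg hle, if_pos h1]
        subst h1
        have e : lo + 1 - lo = 1 := by omega
        refine ⟨by simp [e]; omega, ?_⟩
        intro m _
        have eP : toPoly [(lo : Int), 1] = Polynomial.X + Polynomial.C (lo : ℤ) := by
          simp [toPoly]
          ring
        rw [eP]
        simp [e, riseP]
      · rw [prodT, if_neg hle, if_neg h1]
        have hmid1 : lo < (lo + hi) / 2 := by omega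
        have hmid2 : (lo + hi) / 2 < hi := by omega
        obtain ⟨L1, P1⟩ := ih lo ((lo + hi) / 2) (by omega)
        obtain ⟨L2, P2⟩ := ih ((lo + hi) / 2) hi (by omega)
        have hsplit : riseP lo ((lo + hi) / 2 - lo) * riseP ((lo + hi) / 2) (hi - (lo + hi) / 2)
            = riseP lo (hi - lo) := by
          unfold riseP
          rw [← List.prod_append, ← List.map_append,
            range'_split lo ((lo + hi) / 2) hi (by omega) (by omega)]
        have hLm : (polymulT K (prodT K lo ((lo + hi) / 2)) (prodT K ((lo + hi) / 2) hi)).length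
            = min (hi - lo + 1) K := by
          rw [polymulT_length, L1, L2]
          omega
        refine ⟨hLm, ?_⟩
        intro m hmK
        rw [coeff_toPoly]
        by_cases hin : m < min (hi - lo + 1) K
        · rw [polymulT_getD K _ _ m (by rw [L1, L2]; omega)]
          rw [coeff_mul_congr K m hmK _ (riseP lo ((lo + hi) / 2 - lo)) _
            (riseP ((lo + hi) / 2) (hi - (lo + hi) / 2)) P1 P2, hsplit]
        · -- m is past the truncated length, hence past the degree hi - lo < m
          rw [List.getD_eq_getElem?_getD, List.getElem?_eq_none (by rw [hLm]; omega), Option.getD_none]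
          rw [(riseP lo (hi - lo)).coeff_eq_zero_of_natDegree_lt
            (lt_of_le_of_lt (riseP_natDegree lo (hi - lo)) (by omega))]

-- coefficients of the rising factorial are the Stirling numbers
theorem riseCoeff : ∀ (m j : Nat), (riseP 0 m).coeff j = sN m j := by
  intro m
  induction m with
  | zero =>
    intro j
    cases j with
    | zero => simp [sN, riseP]
    | succ t => simp [riseP, Polynomial.coeff_one, sN]
  | succ m ih =>
    intro j
    have e : List.range' 0 (m + 1) = List.range' 0 m ++ [m] := by
      rw [List.range'_1_concat]
      simp
    unfold riseP
    rw [e, List.map_append, List.prod_append, List.map_singleton, List.prod_singleton]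
    rw [mul_add, Polynomial.coeff_add]
    cases j with
    | zero =>
      rw [Polynomial.mul_coeff_zero, Polynomial.coeff_X_zero, mul_zero, zero_add,
        Polynomial.coeff_mul_C]
      have ihz := ih 0
      unfold riseP at ihz
      rw [ihz, sN_rec0]
      ring
    | succ t =>
      rw [Polynomial.coeff_mul_X, Polynomial.coeff_mul_C]
      have ih1 := ih t
      have ih2 := ih (t + 1)
      unfold riseP at ih1 ih2
      rw [ih1, ih2, sN_rec]
      ring

-- B's value on the non-shortcut part of the domain
theorem alt_eq_sN (n k : Int) (h1 : 1 ≤ k) (h2 : k < n) :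
    first_kind_alt n k = sN n.toNat k.toNat := by
  have hne : ¬(n = k) := by omega
  have hk0 : ¬(k = 0) := by omega
  obtain ⟨L, C⟩ := prodT_spec (k + 1).toNat (by omega) n.toNat 0 n.toNat (by omega)
  have e0 : n.toNat - 0 = n.toNat := by omega
  rw [e0] at L C
  unfold first_kind_alt
  rw [if_neg hne, if_neg hk0]
  show (PySem.List.pyGet? (prodT (k + 1).toNat 0 n.toNat) k).getD 0 = sN n.toNat k.toNat
  rw [PySem.List.pyGet?_of_nonneg _ (by omega), ← List.getD_eq_getElem?_getD,
    ← coeff_toPoly, C k.toNat (by omega), riseCoeff]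
-- ===== A side: the DP table =====
def Tbl (N K : Nat) (dp : List (List Int)) : Prop :=
  dp.length = N ∧ ∀ i, i < N → (dp.getD i []).length = K

theorem dpGet_dpSet (N K : Nat) (dp : List (List Int)) (i j i' j' : Nat) (v : Int)
    (hT : Tbl N K dp) (hi : i < N) (hj : j < K) :
    dpGet (dpSet dp i j v) i' j' = if i = i' ∧ j = j' then v else dpGet dp i' j' := by
  obtain ⟨hlen, hrow⟩ := hT
  have hi' : i < dp.length := by omega
  have hjr : j < (dp.getD i []).length := by rw [hrow i hi]; exact hj
  unfold dpGet dpSet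
  rw [getD_set]
  by_cases h1 : i = i'
  · subst h1
    rw [if_pos ⟨rfl, hi'⟩, getD_set]
    by_cases h2 : j = j'
    · rw [if_pos ⟨h2, hjr⟩, if_pos ⟨rfl, h2⟩]
    · rw [if_neg (by tauto), if_neg (by tauto)]
  · rw [if_neg (by tauto), if_neg (by tauto)]

theorem Tbl_dpSet (N K : Nat) (dp : List (List Int)) (i j : Nat) (v : Int)
    (hT : Tbl N K dp) (hi : i < N) : Tbl N K (dpSet dp i j v) := by
  obtain ⟨hlen, hrow⟩ := hT
  refine ⟨by simp [dpSet, List.length_set, hlen], ?_⟩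
  intro i' hi'
  unfold dpSet
  rw [getD_set]
  split_ifs with h
  · obtain ⟨h1, _⟩ := h
    subst h1
    rw [List.length_set]
    exact hrow i hi'
  · exact hrow i' hi'

-- proof-side names for the stages of A's table (defeq to the port's let-bound values)
def dpA0 (N K : Nat) : List (List Int) := List.replicate N (List.replicate K (0 : Int))
def dpA1 (N K : Nat) : List (List Int) :=
  (List.range K).foldl (fun dp i => dpSet dp i i 1) (dpA0 N K)
def dpA2 (N K m : Nat) : List (List Int) :=
  (List.range' 2 m).foldl (fun dp i =>
    (List.range' 1 (min i K - 1)).foldl (fun dp j =>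
      dpSet dp i j (dpGet dp (i - 1) (j - 1) + ((i - 1 : Nat) : Int) * dpGet dp (i - 1) j)) dp)
    (dpA1 N K)

theorem dpA0_spec (N K : Nat) :
    Tbl N K (dpA0 N K) ∧ ∀ i j, i < N → j < K → dpGet (dpA0 N K) i j = 0 := by
  have hget : ∀ i, i < N → (dpA0 N K).getD i [] = List.replicate K (0 : Int) := by
    intro i hi
    rw [dpA0, List.getD_eq_getElem?_getD, List.getElem?_replicate, if_pos hi]
    rfl
  refine ⟨⟨by simp [dpA0], ?_⟩, ?_⟩
  · intro i hi
    rw [hget i hi]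
    simp
  · intro i j hi hj
    unfold dpGet
    rw [hget i hi, List.getD_eq_getElem?_getD, List.getElem?_replicate, if_pos hj]
    rfl

theorem dp1_inv (N K : Nat) (hKN : K ≤ N) : ∀ m, m ≤ K →
    Tbl N K ((List.range m).foldl (fun dp i => dpSet dp i i 1) (dpA0 N K)) ∧
    ∀ i j, i < N → j < K →
      dpGet ((List.range m).foldl (fun dp i => dpSet dp i i 1) (dpA0 N K)) i j
        = if i = j ∧ i < m then 1 else 0 := by
  intro m
  induction m with
  | zero =>
    intro _
    obtain ⟨hT, hv⟩ := dpA0_spec N K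
    refine ⟨hT, ?_⟩
    intro i j hi hj
    rw [List.range_zero, List.foldl_nil, hv i j hi hj, if_neg (show ¬(i = j ∧ i < 0) by omega)]
  | succ m ih =>
    intro hm
    obtain ⟨hT, hval⟩ := ih (by omega)
    rw [List.range_succ, List.foldl_append, List.foldl_cons, List.foldl_nil]
    have hmN : m < N := by omega
    have hmK : m < K := by omega
    refine ⟨Tbl_dpSet N K _ m m 1 hT hmN, ?_⟩
    intro i j hi hj
    rw [dpGet_dpSet N K _ m m i j 1 hT hmN hmK, hval i j hi hj]
    split_ifs <;> first | rfl | omega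

theorem dp1_spec (N K : Nat) (hKN : K ≤ N) :
    Tbl N K (dpA1 N K) ∧
    ∀ i j, i < N → j < K → dpGet (dpA1 N K) i j = if i = j then 1 else 0 := by
  obtain ⟨hT, hv⟩ := dp1_inv N K hKN K (le_refl K)
  refine ⟨hT, ?_⟩
  intro i j hi hj
  rw [dpA1, hv i j hi hj]
  split_ifs <;> first | rfl | omega

-- the inner loop over j fills row p+1 from row p
theorem inner_inv (N K p : Nat) (dp : List (List Int)) (hT : Tbl N K dp)
    (hp : 1 ≤ p) (hiN : p + 1 < N) (hK : 2 ≤ K)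
    (hprev : ∀ j, j < K → dpGet dp p j = sN p j)
    (hrow : ∀ j, j < K → dpGet dp (p + 1) j = if p + 1 = j then 1 else 0) :
    ∀ c, c ≤ min (p + 1) K - 1 →
    Tbl N K ((List.range' 1 c).foldl (fun dp j =>
        dpSet dp (p + 1) j (dpGet dp (p + 1 - 1) (j - 1) + ((p + 1 - 1 : Nat) : Int) * dpGet dp (p + 1 - 1) j)) dp) ∧
    (∀ i' j', i' ≠ p + 1 →
      dpGet ((List.range' 1 c).foldl (fun dp j =>
        dpSet dp (p + 1) j (dpGet dp (p + 1 - 1) (j - 1) + ((p + 1 - 1 : Nat) : Int) * dpGet dp (p + 1 - 1) j)) dp) i' j' = dpGet dp i' j') ∧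
    (∀ j, j < K →
      dpGet ((List.range' 1 c).foldl (fun dp j =>
        dpSet dp (p + 1) j (dpGet dp (p + 1 - 1) (j - 1) + ((p + 1 - 1 : Nat) : Int) * dpGet dp (p + 1 - 1) j)) dp) (p + 1) j
        = if 1 ≤ j ∧ j ≤ c then sN (p + 1) j else if p + 1 = j then 1 else 0) := by
  intro c
  induction c with
  | zero =>
    intro _
    refine ⟨hT, fun _ _ _ => rfl, ?_⟩
    intro j hj
    rw [List.range'_zero, List.foldl_nil, hrow j hj,
      if_neg (show ¬(1 ≤ j ∧ j ≤ 0) by omega)]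
  | succ c ihc =>
    intro hc
    obtain ⟨hTc, hfix, hvals⟩ := ihc (by omega)
    rw [List.range'_concat, List.foldl_append, List.foldl_cons, List.foldl_nil]
    have e0 : 1 + 1 * c = 1 + c := by omega
    rw [e0]
    have hcK : 1 + c < K := by omega
    have hcp : 1 + c ≤ p := by omega
    have e1 : 1 + c - 1 = c := by omega
    have e2 : p + 1 - 1 = p := by omega
    -- the two reads feeding the write go to row p, untouched so far
    have hr1 : dpGet ((List.range' 1 c).foldl (fun dp j =>
        dpSet dp (p + 1) j (dpGet dp (p + 1 - 1) (j - 1) + ((p + 1 - 1 : Nat) : Int) * dpGet dp (p + 1 - 1) j)) dp) (p + 1 - 1) (1 + c - 1) = sN p c := by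
      rw [hfix (p + 1 - 1) (1 + c - 1) (by omega), e1, e2, hprev c (by omega)]
    have hr2 : dpGet ((List.range' 1 c).foldl (fun dp j =>
        dpSet dp (p + 1) j (dpGet dp (p + 1 - 1) (j - 1) + ((p + 1 - 1 : Nat) : Int) * dpGet dp (p + 1 - 1) j)) dp) (p + 1 - 1) (1 + c) = sN p (1 + c) := by
      rw [hfix (p + 1 - 1) (1 + c) (by omega), e2, hprev (1 + c) (by omega)]
    have hval : dpGet ((List.range' 1 c).foldl (fun dp j =>
        dpSet dp (p + 1) j (dpGet dp (p + 1 - 1) (j - 1) + ((p + 1 - 1 : Nat) : Int) * dpGet dp (p + 1 - 1) j)) dp) (p + 1 - 1) (1 + c - 1)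
        + ((p + 1 - 1 : Nat) : Int) * dpGet ((List.range' 1 c).foldl (fun dp j =>
        dpSet dp (p + 1) j (dpGet dp (p + 1 - 1) (j - 1) + ((p + 1 - 1 : Nat) : Int) * dpGet dp (p + 1 - 1) j)) dp) (p + 1 - 1) (1 + c)
        = sN (p + 1) (1 + c) := by
      rw [hr1, hr2, e2]
      have e3 : 1 + c = c + 1 := by omega
      rw [e3, sN_rec]
    refine ⟨Tbl_dpSet N K _ (p + 1) (1 + c) _ hTc (by omega), ?_, ?_⟩
    · intro i' j' hne
      rw [dpGet_dpSet N K _ (p + 1) (1 + c) i' j' _ hTc (by omega) hcK,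
        if_neg (by tauto), hfix i' j' hne]
    · intro j hj
      rw [dpGet_dpSet N K _ (p + 1) (1 + c) (p + 1) j _ hTc (by omega) hcK]
      by_cases hjc : 1 + c = j
      · rw [if_pos ⟨rfl, hjc⟩, if_pos (show 1 ≤ j ∧ j ≤ c + 1 by omega), ← hjc, hval]
      · rw [if_neg (by tauto), hvals j hj]
        split_ifs <;> first | rfl | (exfalso; omega)

theorem inner_spec (N K p : Nat) (dp : List (List Int)) (hT : Tbl N K dp)
    (hp : 1 ≤ p) (hiN : p + 1 < N) (hK : 2 ≤ K)
    (hprev : ∀ j, j < K → dpGet dp p j = sN p j)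
    (hrow : ∀ j, j < K → dpGet dp (p + 1) j = if p + 1 = j then 1 else 0) :
    Tbl N K ((List.range' 1 (min (p + 1) K - 1)).foldl (fun dp j =>
        dpSet dp (p + 1) j (dpGet dp (p + 1 - 1) (j - 1) + ((p + 1 - 1 : Nat) : Int) * dpGet dp (p + 1 - 1) j)) dp) ∧
    (∀ i' j', i' ≠ p + 1 →
      dpGet ((List.range' 1 (min (p + 1) K - 1)).foldl (fun dp j =>
        dpSet dp (p + 1) j (dpGet dp (p + 1 - 1) (j - 1) + ((p + 1 - 1 : Nat) : Int) * dpGet dp (p + 1 - 1) j)) dp) i' j' = dpGet dp i' j') ∧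
    (∀ j, j < K →
      dpGet ((List.range' 1 (min (p + 1) K - 1)).foldl (fun dp j =>
        dpSet dp (p + 1) j (dpGet dp (p + 1 - 1) (j - 1) + ((p + 1 - 1 : Nat) : Int) * dpGet dp (p + 1 - 1) j)) dp) (p + 1) j = sN (p + 1) j) := by
  obtain ⟨hT', hfix, hvals⟩ :=
    inner_inv N K p dp hT hp hiN hK hprev hrow (min (p + 1) K - 1) (le_refl _)
  refine ⟨hT', hfix, ?_⟩
  intro j hj
  rw [hvals j hj]
  by_cases h1 : 1 ≤ j ∧ j ≤ min (p + 1) K - 1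
  · rw [if_pos h1]
  · rw [if_neg h1]
    by_cases h0 : j = 0
    · subst h0
      rw [if_neg (show ¬(p + 1 = 0) by omega)]
      exact (sN_zero p).symm
    · by_cases hd : p + 1 = j
      · rw [if_pos hd, ← hd, sN_diag]
      · rw [if_neg hd]
        exact (sN_vanish (p + 1) j (by omega)).symm

theorem outer_inv (N K : Nat) (hK : 2 ≤ K) (hKN : K < N) : ∀ m, m ≤ N - 2 →
    Tbl N K (dpA2 N K m) ∧
    (∀ j, j < K → dpGet (dpA2 N K m) (m + 1) j = sN (m + 1) j) ∧
    (∀ i j, m + 1 < i → i < N → j < K → dpGet (dpA2 N K m) i j = if i = j then 1 else 0) := by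
  intro m
  induction m with
  | zero =>
    intro _
    obtain ⟨hT, hv⟩ := dp1_spec N K (by omega)
    have e : dpA2 N K 0 = dpA1 N K := rfl
    refine ⟨e ▸ hT, ?_, ?_⟩
    · intro j hj
      simp only [Nat.zero_add]
      rw [e, hv 1 j (by omega) hj]
      by_cases h1 : j = 0
      · subst h1
        rw [if_neg (show ¬(1 = 0) by omega)]
        exact (sN_zero 0).symm
      · by_cases h2 : j = 1
        · subst h2
          rw [if_pos rfl]
          exact (sN_diag 1).symm
        · rw [if_neg (show ¬(1 = j) by omega)]
          exact (sN_vanish 1 j (by omega)).symm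
    · intro i j _ hi hj
      rw [e]
      exact hv i j hi hj
  | succ m ih =>
    intro hm
    obtain ⟨hT, hrowm, hdiag⟩ := ih (by omega)
    have hstep : dpA2 N K (m + 1) = (List.range' 1 (min (m + 1 + 1) K - 1)).foldl (fun dp j =>
        dpSet dp (m + 1 + 1) j (dpGet dp (m + 1 + 1 - 1) (j - 1) + ((m + 1 + 1 - 1 : Nat) : Int) * dpGet dp (m + 1 + 1 - 1) j)) (dpA2 N K m) := by
      rw [dpA2, List.range'_concat, List.foldl_append, List.foldl_cons, List.foldl_nil]
      have e0 : 2 + 1 * m = m + 1 + 1 := by omega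
      rw [e0]
      rfl
    obtain ⟨hT', hfix, hvals⟩ := inner_spec N K (m + 1) (dpA2 N K m) hT (by omega) (by omega) hK hrowm
      (fun j hj => hdiag (m + 1 + 1) j (by omega) (by omega) hj)
    rw [hstep]
    refine ⟨hT', hvals, ?_⟩
    intro i j hi hiN hj
    rw [hfix i j (by omega)]
    exact hdiag i j (by omega) hiN hj

theorem first_kind_eq_sN (n k : Int) (h1 : 1 ≤ k) (h2 : k < n) :
    first_kind n k = sN n.toNat k.toNat := by
  have hne : ¬(n = k) := by omega
  have hk0 : ¬(k = 0) := by omega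
  have hA : first_kind n k =
      ((dpA2 (n + 1).toNat (k + 1).toNat ((n + 1).toNat - 2)).getD
        ((dpA2 (n + 1).toNat (k + 1).toNat ((n + 1).toNat - 2)).length - 1) []).getD
      (((dpA2 (n + 1).toNat (k + 1).toNat ((n + 1).toNat - 2)).getD
        ((dpA2 (n + 1).toNat (k + 1).toNat ((n + 1).toNat - 2)).length - 1) []).length - 1) 0 := by
    unfold first_kind
    rw [if_neg hne, if_neg hk0]
    rfl
  rw [hA]
  have hK2 : 2 ≤ (k + 1).toNat := by omega
  have hKN : (k + 1).toNat < (n + 1).toNat := by omega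
  obtain ⟨⟨hlen, hrows⟩, hrowm, _⟩ :=
    outer_inv (n + 1).toNat (k + 1).toNat hK2 hKN ((n + 1).toNat - 2) (le_refl _)
  have eN : (n + 1).toNat - 2 + 1 = (n + 1).toNat - 1 := by omega
  rw [eN] at hrowm
  have eq1 : (n + 1).toNat - 1 = n.toNat := by omega
  have eq2 : (k + 1).toNat - 1 = k.toNat := by omega
  rw [eq1] at hrowm
  rw [hlen, hrows ((n + 1).toNat - 1) (by omega), eq1, eq2]
  exact hrowm k.toNat (by omega)


-- ===== VERDICT (by name: the statement is the Claim_ definition above) =====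
theorem first_kind_spec : Claim_equal_first_kind := by
  intro n k _ hpre
  unfold Spec_first_kind
  by_cases he : n = k
  · unfold first_kind first_kind_alt
    rw [if_pos he, if_pos he]
  · by_cases hz : k = 0
    · unfold first_kind first_kind_alt
      rw [if_neg he, if_pos hz, if_neg he, if_pos hz]
    · have hk : 1 ≤ k ∧ k < n := by
        unfold Pre_first_kind at hpre
        omega
      rw [alt_eq_sN n k hk.1 hk.2]
      exact first_kind_eq_sN n k hk.1 hk.2
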